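-- pv_equiv track=rewrite | github.com/jereSL/final---proyecto-python-inicial | main.py | validar_palabra
-- ===== SOURCE A (Python) =====
-- def validar_palabra(letras_usadas, palabra_secreta):
--     a = 0
--     for i in palabra_secreta:
--         if i not in letras_usadas:
--             a = 0
--         else:
--             a = a + 1
--     if a == len(palabra_secreta):
--         return(True)
--     else:
--         return(False)
-- ===== SOURCE B (Python) =====
-- def validar_palabra(letras_usadas, palabra_secreta):
--     return set(palabra_secreta) <= set(letras_usadas)
-- ===== Notes on version B (the rewrite author's own statement) =====
-- stated objective: faster
-- what changed: Replaces the char-by-char scan with a reset-on-miss counter (each char scanned against the whole list) by a set-subset test: set(palabra_secreta) <= set(letras_usadas).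
import Mathlib
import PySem

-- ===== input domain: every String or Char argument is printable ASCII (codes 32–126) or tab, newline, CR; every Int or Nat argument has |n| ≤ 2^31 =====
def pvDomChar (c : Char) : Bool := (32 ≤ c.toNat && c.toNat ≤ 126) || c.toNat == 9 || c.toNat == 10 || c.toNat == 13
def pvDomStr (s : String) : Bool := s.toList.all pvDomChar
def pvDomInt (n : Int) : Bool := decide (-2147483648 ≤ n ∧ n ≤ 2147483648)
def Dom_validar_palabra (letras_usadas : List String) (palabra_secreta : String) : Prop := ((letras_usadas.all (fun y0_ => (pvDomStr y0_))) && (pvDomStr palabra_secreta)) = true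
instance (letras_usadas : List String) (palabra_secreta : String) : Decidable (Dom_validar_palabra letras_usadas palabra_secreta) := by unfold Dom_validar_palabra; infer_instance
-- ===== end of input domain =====

-- B replaces A's reset-on-miss counter scan (list membership per char) by a set-subset test (faster: hashing removes the inner list scan).

-- ===== PORT A =====
-- A: counter a over the chars of palabra_secreta, reset to 0 on a miss, +1 on a hit;
-- returns True iff the final counter equals len(palabra_secreta).
def validar_palabra (letras_usadas : List String) (palabra_secreta : String) : Bool :=
  if palabra_secreta.toList.foldl
      (fun a i => if (String.ofList [i]) ∉ letras_usadas then 0 else a + 1) (0 : Nat)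
     = palabra_secreta.toList.length then true else false

-- ===== PORT B =====
-- B: set(palabra_secreta) <= set(letras_usadas)
def validar_palabra_alt (letras_usadas : List String) (palabra_secreta : String) : Bool :=
  PySem.Set.issubset
    (PySem.Set.ofList (palabra_secreta.toList.map (fun c => String.ofList [c])))
    (PySem.Set.ofList letras_usadas)

-- ===== PRECONDITION & SPEC =====
def Spec_validar_palabra (letras_usadas : List String) (palabra_secreta : String) (out : Bool) : Prop := out = validar_palabra_alt letras_usadas palabra_secreta
instance (letras_usadas : List String) (palabra_secreta : String) (out : Bool) : Decidable (Spec_validar_palabra letras_usadas palabra_secreta out) := by unfold Spec_validar_palabra; infer_instance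

-- ===== CLAIM (what is proved, stated in full; the proofs are below) =====
def Claim_equal_validar_palabra : Prop := ∀ (letras_usadas : List String) (palabra_secreta : String), Dom_validar_palabra letras_usadas palabra_secreta → Spec_validar_palabra letras_usadas palabra_secreta (validar_palabra letras_usadas palabra_secreta)

-- ===== LEMMAS AND PROOFS =====

-- A's loop over characters.
def pvLoopA (lu : List String) : Nat → List Char → Nat
  | a, [] => a
  | a, c :: l => pvLoopA lu (if (String.ofList [c]) ∉ lu then 0 else a + 1) l

theorem pvLoopA_eq_foldl (lu : List String) (a : Nat) (l : List Char) :
    l.foldl (fun a i => if (String.ofList [i]) ∉ lu then 0 else a + 1) a = pvLoopA lu a l := by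
  induction l generalizing a with
  | nil => rfl
  | cons c l ih =>
    rw [List.foldl_cons]
    exact ih _

theorem pvLoopA_le (lu : List String) (l : List Char) (a : Nat) : pvLoopA lu a l ≤ a + l.length := by
  induction l generalizing a with
  | nil => simp [pvLoopA]
  | cons c l ih =>
    by_cases h : (String.ofList [c]) ∈ lu
    · simpa [pvLoopA, h] using le_trans (ih (a + 1)) (by omega)
    · simpa [pvLoopA, h] using le_trans (ih 0) (by omega)

theorem pvLoopA_eq_iff (lu : List String) (l : List Char) :
    ∀ a, (pvLoopA lu a l = a + l.length ↔ ∀ c ∈ l, (String.ofList [c]) ∈ lu) := by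
  induction l with
  | nil => intro a; simp [pvLoopA]
  | cons c l ih =>
    intro a
    by_cases h : (String.ofList [c]) ∈ lu
    · rw [show pvLoopA lu a (c :: l) = pvLoopA lu (a + 1) l by simp [pvLoopA, h]]
      constructor
      · intro hx
        have hx' : pvLoopA lu (a + 1) l = (a + 1) + l.length := by
          simp only [List.length_cons] at hx; omega
        intro x hxm
        rcases List.mem_cons.mp hxm with rfl | hm
        · exact h
        · exact (ih (a + 1)).mp hx' x hm
      · intro hx
        have := (ih (a + 1)).mpr (fun x hm => hx x (List.mem_cons_of_mem _ hm))
        simp only [List.length_cons]; omega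
    · rw [show pvLoopA lu a (c :: l) = pvLoopA lu 0 l by simp [pvLoopA, h]]
      constructor
      · intro hx
        exfalso
        have := pvLoopA_le lu l 0
        simp only [List.length_cons] at hx
        omega
      · intro hx; exact absurd (hx c List.mem_cons_self) h

theorem validar_palabra_eq (letras_usadas : List String) (palabra_secreta : String) :
    validar_palabra letras_usadas palabra_secreta
      = validar_palabra_alt letras_usadas palabra_secreta := by
  unfold validar_palabra validar_palabra_alt
  rw [pvLoopA_eq_foldl]
  by_cases h : ∀ c ∈ palabra_secreta.toList, (String.ofList [c]) ∈ letras_usadas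
  · have h1 : pvLoopA letras_usadas 0 palabra_secreta.toList
        = 0 + palabra_secreta.toList.length := (pvLoopA_eq_iff _ _ 0).mpr h
    have h2 : PySem.Set.issubset
        (PySem.Set.ofList (palabra_secreta.toList.map (fun c => String.ofList [c])))
        (PySem.Set.ofList letras_usadas) = true := by
      rw [PySem.Set.issubset_iff]
      intro x hx
      rw [PySem.Set.mem_ofList] at hx ⊢
      obtain ⟨c, hc, rfl⟩ := List.mem_map.mp hx
      exact h c hc
    simp [h1, h2]
  · have h1 : pvLoopA letras_usadas 0 palabra_secreta.toList
        ≠ 0 + palabra_secreta.toList.length := fun hx => h ((pvLoopA_eq_iff _ _ 0).mp hx)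
    have h2 : PySem.Set.issubset
        (PySem.Set.ofList (palabra_secreta.toList.map (fun c => String.ofList [c])))
        (PySem.Set.ofList letras_usadas) = false := by
      rw [Bool.eq_false_iff]
      intro hx
      rw [PySem.Set.issubset_iff] at hx
      apply h
      intro c hc
      have := hx (String.ofList [c]) (by rw [PySem.Set.mem_ofList]; exact List.mem_map.mpr ⟨c, hc, rfl⟩)
      rwa [PySem.Set.mem_ofList] at this
    simp at h1
    simp [h1, h2]

-- ===== VERDICT (by name: the statement is the Claim_ definition above) =====
theorem validar_palabra_spec : Claim_equal_validar_palabra := by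
  intro lu ps _
  unfold Spec_validar_palabra
  exact validar_palabra_eq lu ps
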